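-- pv_equiv track=rewrite | github.com/blalor/adventofcode-2024 | day2/lib.py | is_adjacent_enough
-- ===== SOURCE A (Python) =====
-- def is_adjacent_enough(input_set: str, how_close: int = 1, how_far: int = 3) -> bool:
--     input_ints = [int(x) for x in input_set.split()]
--
--     for ind in range(1, len(input_ints)):
--         prev = input_ints[ind-1]
--         cur = input_ints[ind]
--
--         if not (how_close <= abs(prev-cur) <= how_far):
--             return False
--
--     return True
-- ===== SOURCE B (Python) =====
-- def is_adjacent_enough(input_set: str, how_close: int = 1, how_far: int = 3) -> bool:
--     ints = [int(x) for x in input_set.split()]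
--     diffs = [abs(a - b) for a, b in zip(ints, ints[1:])]
--     if not diffs:
--         return True
--     return how_close <= min(diffs) and max(diffs) <= how_far
-- ===== Notes on version B (the rewrite author's own statement) =====
-- stated objective: alternative
-- what changed: Replaced the short-circuiting per-index loop with build-then-reduce: precompute the list of absolute adjacent differences via zip and test how_close <= min(diffs) and max(diffs) <= how_far.
import Mathlib
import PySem

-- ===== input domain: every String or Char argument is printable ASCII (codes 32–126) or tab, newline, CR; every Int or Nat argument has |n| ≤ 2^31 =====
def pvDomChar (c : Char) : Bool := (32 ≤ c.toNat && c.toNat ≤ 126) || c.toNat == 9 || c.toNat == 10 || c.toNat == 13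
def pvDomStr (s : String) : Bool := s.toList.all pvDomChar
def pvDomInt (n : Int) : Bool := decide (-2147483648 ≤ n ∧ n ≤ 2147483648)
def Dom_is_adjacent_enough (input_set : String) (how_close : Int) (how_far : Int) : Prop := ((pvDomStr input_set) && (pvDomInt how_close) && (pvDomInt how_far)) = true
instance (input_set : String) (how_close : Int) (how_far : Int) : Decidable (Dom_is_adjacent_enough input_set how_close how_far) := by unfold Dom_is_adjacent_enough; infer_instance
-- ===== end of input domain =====

-- B rebuilds the check as build-then-reduce (zip into a diff list, then min/max bounds)
-- instead of A's short-circuiting per-index loop; objective: alternative decomposition.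

-- ===== PORT A =====
-- shared parse: [int(x) for x in input_set.split()]; getD 0 is only a totaliser,
-- Pre_ guarantees every token parses.
def pvInts (s : String) : List Int :=
  (PySem.Str.split₀ s).map (fun x => (PySem.Int.ofStr? x).getD 0)

-- the 'for ind in range(1, len(input_ints))' loop with early return False
def pvALoop (ints : List Int) (hc hf : Int) : List Int → Bool
  | [] => true
  | ind :: rest =>
    let prev := PySem.List.pyGetD ints (ind - 1) 0
    let cur := PySem.List.pyGetD ints ind 0
    if !(decide (hc ≤ |prev - cur|) && decide (|prev - cur| ≤ hf)) then false
    else pvALoop ints hc hf rest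

def is_adjacent_enough (input_set : String) (how_close : Int) (how_far : Int) : Bool :=
  let ints := pvInts input_set
  pvALoop ints how_close how_far (PySem.List.pyRange 1 (ints.length : Int) 1)

-- ===== PORT B =====
def is_adjacent_enough_alt (input_set : String) (how_close : Int) (how_far : Int) : Bool :=
  let ints := pvInts input_set
  let diffs := (ints.zip ints.tail).map (fun p => |p.1 - p.2|)
  if diffs.isEmpty then true
  else decide (how_close ≤ (PySem.List.min? diffs (fun y => y)).getD 0)
       && decide ((PySem.List.max? diffs (fun y => y)).getD 0 ≤ how_far)

-- ===== PRECONDITION & SPEC =====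
-- Pre_ excludes exactly the inputs where int(x) raises ValueError on some whitespace-separated token.
def Pre_is_adjacent_enough (input_set : String) (how_close : Int) (how_far : Int) : Prop :=
  ∀ t ∈ PySem.Str.split₀ input_set, (PySem.Int.ofStr? t).isSome = true
instance (input_set : String) (how_close : Int) (how_far : Int) : Decidable (Pre_is_adjacent_enough input_set how_close how_far) := by unfold Pre_is_adjacent_enough; infer_instance

def pvWitness_is_adjacent_enough : String × Int × Int := ("1 3 6", 1, 3)

def Spec_is_adjacent_enough (input_set : String) (how_close : Int) (how_far : Int) (out : Bool) : Prop := out = is_adjacent_enough_alt input_set how_close how_far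
instance (input_set : String) (how_close : Int) (how_far : Int) (out : Bool) : Decidable (Spec_is_adjacent_enough input_set how_close how_far out) := by unfold Spec_is_adjacent_enough; infer_instance

-- ===== CLAIM (what is proved, stated in full; the proofs are below) =====
def Claim_equal_is_adjacent_enough : Prop := ∀ (input_set : String) (how_close : Int) (how_far : Int), Dom_is_adjacent_enough input_set how_close how_far → Pre_is_adjacent_enough input_set how_close how_far → Spec_is_adjacent_enough input_set how_close how_far (is_adjacent_enough input_set how_close how_far)

-- ===== LEMMAS AND PROOFS =====

-- common reference form: every adjacent pair is in [hc, hf]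
def pvAdjAll (hc hf : Int) : List Int → Bool
  | a :: b :: rest => (decide (hc ≤ |a - b|) && decide (|a - b| ≤ hf)) && pvAdjAll hc hf (b :: rest)
  | _ => true

lemma pvAdjAll_short (hc hf : Int) (l : List Int) (h : l.length ≤ 1) :
    pvAdjAll hc hf l = true := by
  match l, h with
  | [], _ => rfl
  | [_], _ => rfl

lemma pvALoop_eq_adjAll (hc hf : Int) (ints : List Int) (k : Nat) :
    pvALoop ints hc hf (PySem.List.pyRange ((k : Int) + 1) (ints.length : Int) 1)
      = pvAdjAll hc hf (ints.drop k) := by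
  generalize hm : ints.length - k = m
  induction m generalizing k with
  | zero =>
    rw [PySem.List.pyRange_one_eq_nil (by push_cast; omega)]
    rw [pvAdjAll_short hc hf _ (by simp; omega)]
    rfl
  | succ m ih =>
    by_cases hlt : k + 1 < ints.length
    · rw [PySem.List.pyRange_one_cons (by push_cast; omega)]
      have hk : k < ints.length := by omega
      rw [List.drop_eq_getElem_cons hk, List.drop_eq_getElem_cons hlt]
      show (if _ then _ else _) = _
      have hprev : PySem.List.pyGetD ints ((k : Int) + 1 - 1) 0 = ints[k] := by
        rw [show (k : Int) + 1 - 1 = ((k : Nat) : Int) by push_cast; ring]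
        rw [PySem.List.pyGetD_eq_getElem ints 0 (by exact_mod_cast Nat.zero_le k)
          (by exact_mod_cast hk)]
        simp
      have hcur : PySem.List.pyGetD ints ((k : Int) + 1) 0 = ints[k + 1] := by
        rw [show (k : Int) + 1 = ((k + 1 : Nat) : Int) by push_cast; ring]
        rw [PySem.List.pyGetD_eq_getElem ints 0 (by exact_mod_cast Nat.zero_le (k + 1))
          (by exact_mod_cast hlt)]
        simp
      rw [hprev, hcur]
      by_cases hc1 : (decide (hc ≤ |ints[k] - ints[k + 1]|) && decide (|ints[k] - ints[k + 1]| ≤ hf)) = true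
      · rw [if_neg (by simp [hc1])]
        have := ih (k + 1) (by omega)
        rw [show ((k + 1 : Nat) : Int) + 1 = (k : Int) + 1 + 1 by push_cast; ring] at this
        rw [List.drop_eq_getElem_cons hlt] at this
        rw [this]
        show _ = (_ && _)
        rw [hc1, Bool.true_and]
      · rw [if_pos (by simp [Bool.eq_false_iff.mpr hc1])]
        show _ = (_ && _)
        rw [Bool.eq_false_iff.mpr hc1, Bool.false_and]
    · rw [PySem.List.pyRange_one_eq_nil (by push_cast; omega)]
      rw [pvAdjAll_short hc hf _ (by simp; omega)]
      rfl

-- B's diff list, structurally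
lemma pvAdjAll_eq_all (hc hf : Int) (l : List Int) :
    pvAdjAll hc hf l
      = ((l.zip l.tail).map (fun p => |p.1 - p.2|)).all
          (fun d => decide (hc ≤ d) && decide (d ≤ hf)) := by
  match l with
  | [] => rfl
  | [_] => rfl
  | a :: b :: rest =>
    show (_ && _) = _
    rw [pvAdjAll_eq_all hc hf (b :: rest)]
    simp [List.all_cons]

lemma pv_le_foldl_min (hc d : Int) (ds : List Int) :
    (hc ≤ ds.foldl min d) ↔ (hc ≤ d ∧ ∀ x ∈ ds, hc ≤ x) := by
  induction ds generalizing d with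
  | nil => simp
  | cons x ds ih =>
    simp only [List.foldl_cons, ih, le_min_iff, List.mem_cons]
    constructor
    · rintro ⟨⟨h1, h2⟩, h3⟩
      exact ⟨h1, fun y hy => by rcases hy with rfl | hy; exact h2; exact h3 y hy⟩
    · rintro ⟨h1, h2⟩
      exact ⟨⟨h1, h2 x (Or.inl rfl)⟩, fun y hy => h2 y (Or.inr hy)⟩

lemma pv_foldl_max_le (hf d : Int) (ds : List Int) :
    (ds.foldl max d ≤ hf) ↔ (d ≤ hf ∧ ∀ x ∈ ds, x ≤ hf) := by
  induction ds generalizing d with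
  | nil => simp
  | cons x ds ih =>
    simp only [List.foldl_cons, ih, max_le_iff, List.mem_cons]
    constructor
    · rintro ⟨⟨h1, h2⟩, h3⟩
      exact ⟨h1, fun y hy => by rcases hy with rfl | hy; exact h2; exact h3 y hy⟩
    · rintro ⟨h1, h2⟩
      exact ⟨⟨h1, h2 x (Or.inl rfl)⟩, fun y hy => h2 y (Or.inr hy)⟩

lemma pvAlt_eq_adjAll (hc hf : Int) (ints : List Int) :
    (let diffs := (ints.zip ints.tail).map (fun p => |p.1 - p.2|)
     if diffs.isEmpty then true
     else decide (hc ≤ (PySem.List.min? diffs (fun y => y)).getD 0)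
          && decide ((PySem.List.max? diffs (fun y => y)).getD 0 ≤ hf))
      = pvAdjAll hc hf ints := by
  rw [pvAdjAll_eq_all]
  cases hd : (ints.zip ints.tail).map (fun p => |p.1 - p.2|) with
  | nil => rfl
  | cons d ds =>
    show (if _ then _ else _) = _
    rw [if_neg (by simp)]
    rw [PySem.List.min?_id_cons, PySem.List.max?_id_cons]
    simp only [Option.getD_some]
    rw [Bool.eq_iff_iff]
    simp only [Bool.and_eq_true, decide_eq_true_eq, List.all_eq_true, List.mem_cons,
      pv_le_foldl_min, pv_foldl_max_le]
    constructor
    · rintro ⟨⟨h1, h2⟩, h3, h4⟩ x hx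
      rcases hx with rfl | hx
      · exact ⟨h1, h3⟩
      · exact ⟨h2 x hx, h4 x hx⟩
    · intro h
      exact ⟨⟨(h d (Or.inl rfl)).1, fun x hx => (h x (Or.inr hx)).1⟩,
             (h d (Or.inl rfl)).2, fun x hx => (h x (Or.inr hx)).2⟩

-- ===== VERDICT (by name: the statement is the Claim_ definition above) =====
theorem is_adjacent_enough_spec : Claim_equal_is_adjacent_enough := by
  intro input_set hc hf _ _
  unfold Spec_is_adjacent_enough is_adjacent_enough is_adjacent_enough_alt
  rw [pvAlt_eq_adjAll]
  have h0 := pvALoop_eq_adjAll hc hf (pvInts input_set) 0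
  simpa using h0
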